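-- pv_equiv track=rewrite | github.com/Yallewbinyam/AIPET | dashboard/backend/watch/baseline.py | get_worst_severity
-- ===== SOURCE A (Python) =====
-- def get_worst_severity(findings_for_device):
--     """Returns the worst severity found on a device."""
--     rank = {"Critical": 4, "High": 3, "Medium": 2, "Low": 1, "Info": 0}
--     worst = "None"
--     worst_rank = -1
--     for f in findings_for_device:
--         sev = f.get("severity", "Info")
--         if rank.get(sev, 0) > worst_rank:
--             worst_rank = rank.get(sev, 0)
--             worst = sev
--     return worst
-- ===== SOURCE B (Python) =====
-- def get_worst_severity(findings_for_device):
--     """Returns the worst severity found on a device."""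
--     rank = {"Critical": 4, "High": 3, "Medium": 2, "Low": 1, "Info": 0}
--     sevs = [f.get("severity", "Info") for f in findings_for_device]
--     if not sevs:
--         return "None"
--     top = max(rank.get(s, 0) for s in sevs)
--     return next(s for s in sevs if rank.get(s, 0) == top)
-- ===== Notes on version B (the rewrite author's own statement) =====
-- stated objective: alternative
-- what changed: Replaces A's single accumulator loop (worst, worst_rank updated on strict improvement) with a two-pass decomposition: map findings to severities, take max() of their ranks, then next() the first severity attaining that rank.
import Mathlib
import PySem

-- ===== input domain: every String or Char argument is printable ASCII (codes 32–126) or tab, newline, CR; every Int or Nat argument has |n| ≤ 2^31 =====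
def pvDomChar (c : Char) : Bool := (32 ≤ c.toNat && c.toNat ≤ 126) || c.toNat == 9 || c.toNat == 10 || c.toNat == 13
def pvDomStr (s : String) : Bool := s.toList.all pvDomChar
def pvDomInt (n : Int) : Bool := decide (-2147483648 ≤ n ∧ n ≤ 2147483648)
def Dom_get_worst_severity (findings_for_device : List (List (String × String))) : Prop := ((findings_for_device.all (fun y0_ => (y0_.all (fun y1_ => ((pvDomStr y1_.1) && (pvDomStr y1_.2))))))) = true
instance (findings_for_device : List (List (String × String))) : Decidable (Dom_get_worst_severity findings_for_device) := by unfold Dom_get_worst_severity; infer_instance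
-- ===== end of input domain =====

-- B: instead of A's single accumulator loop, map each finding to its severity, take the maximum
-- rank in one pass and return the first severity attaining it (objective: alternative decomposition).

-- the severity-rank table both Pythons build as a dict literal
def pvRankDict : PySem.Dict String Int :=
  PySem.Dict.mk [("Critical", 4), ("High", 3), ("Medium", 2), ("Low", 1), ("Info", 0)]

-- ===== PORT A =====
def get_worst_severity (findings_for_device : List (List (String × String))) : String :=
  (findings_for_device.foldl
    (fun (st : String × Int) f =>
      let sev := PySem.Dict.getD (PySem.Dict.mk f) "severity" "Info"
      if PySem.Dict.getD pvRankDict sev 0 > st.2 then (sev, PySem.Dict.getD pvRankDict sev 0)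
      else st)
    ("None", -1)).1

-- ===== PORT B =====
def get_worst_severity_alt (findings_for_device : List (List (String × String))) : String :=
  let sevs := findings_for_device.map (fun f => PySem.Dict.getD (PySem.Dict.mk f) "severity" "Info")
  if sevs.isEmpty then "None"
  else
    -- max(...): sevs is nonempty, so max? is some; the .getD default is unreachable
    let top := (PySem.List.max? (sevs.map (fun s => PySem.Dict.getD pvRankDict s 0)) (fun x => x)).getD 0
    -- next(...): top is attained in sevs, so find? is some; the .getD default is unreachable
    (sevs.find? (fun s => PySem.Dict.getD pvRankDict s 0 == top)).getD ""

-- ===== PRECONDITION & SPEC =====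
def Spec_get_worst_severity (findings_for_device : List (List (String × String))) (out : String) : Prop := out = get_worst_severity_alt findings_for_device
instance (findings_for_device : List (List (String × String))) (out : String) : Decidable (Spec_get_worst_severity findings_for_device out) := by unfold Spec_get_worst_severity; infer_instance

-- ===== CLAIM (what is proved, stated in full; the proofs are below) =====
def Claim_equal_get_worst_severity : Prop := ∀ (findings_for_device : List (List (String × String))), Dom_get_worst_severity findings_for_device → Spec_get_worst_severity findings_for_device (get_worst_severity findings_for_device)

-- ===== LEMMAS AND PROOFS =====

-- rank of a severity string (proof-side shorthand for what both ports compute)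
def pvRk (s : String) : Int := PySem.Dict.getD pvRankDict s 0

-- A's loop step, over the severity string already extracted
def pvStep (st : String × Int) (s : String) : String × Int :=
  if pvRk s > st.2 then (s, pvRk s) else st

-- running maximum of ranks, A's worst_rank accumulator
def pvT (t : List String) (r : Int) : Int := t.foldl (fun a s => max a (pvRk s)) r

lemma pvRk_cases (s : String) : pvRk s = 4 ∨ pvRk s = 3 ∨ pvRk s = 2 ∨ pvRk s = 1 ∨ pvRk s = 0 := by
  simp only [pvRk, pvRankDict, PySem.Dict.getD, PySem.Dict.get?, List.find?]
  repeat' split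
  all_goals simp_all

lemma pvRk_nonneg (s : String) : 0 ≤ pvRk s := by
  rcases pvRk_cases s with h | h | h | h | h <;> omega

lemma pvT_eq (t : List String) (r : Int) : pvT t r = (t.map pvRk).foldl max r := by
  simp [pvT, List.foldl_map]

lemma pvT_ge (t : List String) (r : Int) : r ≤ pvT t r := by
  rw [pvT_eq]; exact (PySem.List.le_foldl_max _ _).1

lemma pvT_mem_le (t : List String) (r : Int) : ∀ s ∈ t, pvRk s ≤ pvT t r := by
  intro s hs
  have := (PySem.List.le_foldl_max (t.map pvRk) r).2 (pvRk s) (by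
    simpa using ⟨s, hs, rfl⟩)
  rw [pvT_eq]
  exact this

lemma pvT_le (t : List String) (r m : Int) (hr : r ≤ m) (h : ∀ s ∈ t, pvRk s ≤ m) :
    pvT t r ≤ m := by
  induction t generalizing r with
  | nil => simpa [pvT]
  | cons x xs ih =>
    show List.foldl (fun a s => max a (pvRk s)) (max r (pvRk x)) xs ≤ m
    exact ih (max r (pvRk x)) (max_le hr (h x (by simp))) (fun s hs => h s (by simp [hs]))

-- no update when every remaining rank is ≤ the accumulator
lemma fold_noupdate (t : List String) (w : String) (r : Int)
    (h : ∀ s ∈ t, pvRk s ≤ r) : t.foldl pvStep (w, r) = (w, r) := by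
  induction t with
  | nil => rfl
  | cons x xs ih =>
    have hx : ¬ pvRk x > r := by have := h x (by simp); omega
    simp only [List.foldl_cons, pvStep, hx, reduceIte]
    exact ih (fun s hs => h s (by simp [hs]))

-- A's worst is the first severity whose rank reaches the overall max, provided the max beats r
lemma fold_fst (t : List String) : ∀ (w : String) (r : Int), r < pvT t r →
    (t.foldl pvStep (w, r)).1 = (t.find? (fun s => pvRk s == pvT t r)).getD "" := by
  induction t with
  | nil => intro w r h; simp [pvT] at h
  | cons x xs ih =>
    intro w r hlt
    have hT : pvT (x :: xs) r = pvT xs (max r (pvRk x)) := by simp [pvT]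
    by_cases hx : pvRk x > r
    · have hmax : max r (pvRk x) = pvRk x := by omega
      have hT' : pvT (x :: xs) r = pvT xs (pvRk x) := by rw [hT, hmax]
      by_cases htop : pvRk x = pvT (x :: xs) r
      · have hle : ∀ s ∈ xs, pvRk s ≤ pvRk x := by
          intro s hs
          have := pvT_mem_le xs (pvRk x) s hs
          rw [hT'] at htop
          omega
        simp only [List.foldl_cons, pvStep, if_pos hx, gt_iff_lt]
        rw [fold_noupdate xs x (pvRk x) hle]
        have hb : (pvRk x == pvT (x :: xs) r) = true := by simp [htop]
        simp [hb]
      · have hxlt : pvRk x < pvT xs (pvRk x) := by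
          have h1 := pvT_ge xs (pvRk x)
          rw [hT'] at htop
          omega
        have := ih x (pvRk x) hxlt
        simp only [List.foldl_cons, pvStep, if_pos hx, gt_iff_lt]
        rw [hT']
        have hne : (pvRk x == pvT xs (pvRk x)) = false := by
          simp only [beq_eq_false_iff_ne, ne_eq]
          omega
        simp only [List.find?_cons, hne]
        exact this
    · have hmax : max r (pvRk x) = r := by omega
      have hT' : pvT (x :: xs) r = pvT xs r := by rw [hT, hmax]
      rw [hT'] at hlt
      have hne : (pvRk x == pvT xs r) = false := by
        simp only [beq_eq_false_iff_ne, ne_eq]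
        omega
      simp only [List.foldl_cons, pvStep, if_neg hx, gt_iff_lt]
      rw [hT']
      simp only [List.find?_cons, hne]
      exact ih w r hlt

theorem get_worst_severity_spec : Claim_equal_get_worst_severity := by
  intro l _
  unfold Spec_get_worst_severity get_worst_severity get_worst_severity_alt
  -- rewrite A's fold body to pvStep over the mapped severities
  have hA : (l.foldl (fun (st : String × Int) f =>
      let sev := PySem.Dict.getD (PySem.Dict.mk f) "severity" "Info"
      if PySem.Dict.getD pvRankDict sev 0 > st.2 then (sev, PySem.Dict.getD pvRankDict sev 0)
      else st) ("None", -1))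
      = (l.map (fun f => PySem.Dict.getD (PySem.Dict.mk f) "severity" "Info")).foldl pvStep ("None", -1) := by
    rw [List.foldl_map]; rfl
  rw [hA]
  set sevs := l.map (fun f => PySem.Dict.getD (PySem.Dict.mk f) "severity" "Info") with hsevs
  by_cases hnil : sevs = []
  · simp [hnil]
  · have hne : sevs.isEmpty = false := by simp [hnil]
    simp only [hne, Bool.false_eq_true, if_false]
    -- the ranks list is nonempty, so max? returns some m
    obtain ⟨m, hm⟩ : ∃ m, PySem.List.max? (sevs.map (fun s => PySem.Dict.getD pvRankDict s 0)) (fun x => x) = some m := by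
      cases h : PySem.List.max? (sevs.map (fun s => PySem.Dict.getD pvRankDict s 0)) (fun x => x) with
      | none => exact absurd (by simpa using (PySem.List.max?_eq_none_iff _ _).1 h) hnil
      | some m => exact ⟨m, rfl⟩
    rw [hm]
    -- m = pvT sevs (-1)
    have hmem := PySem.List.max?_mem hm
    obtain ⟨s0, hs0, hs0m⟩ : ∃ s0 ∈ sevs, pvRk s0 = m := by
      simpa [pvRk, eq_comm] using hmem
    have hmT : m = pvT sevs (-1) := by
      have h1 : m ≤ pvT sevs (-1) := hs0m ▸ pvT_mem_le sevs (-1) s0 hs0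
      have h2 : pvT sevs (-1) ≤ m := by
        refine pvT_le sevs (-1) m (by have := pvRk_nonneg s0; omega) ?_
        intro s hs
        have := PySem.List.max?_isMax hm (pvRk s) (by simpa [pvRk] using ⟨s, hs, rfl⟩)
        simpa using this
      omega
    have hlt : (-1 : Int) < pvT sevs (-1) := by
      have := pvT_mem_le sevs (-1) _ hs0
      have := pvRk_nonneg s0
      omega
    rw [fold_fst sevs "None" (-1) hlt, ← hmT]
    rfl
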